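-- pv_equiv track=rewrite | github.com/vcosss/flow-to-code | encoding and model/200_dataset/DATASET/python_code/CODE_PID_155.py | fun155
-- ===== SOURCE A (Python) =====
-- def fun155(string):
--     length = len(string)
--     new = ''
--     i = 0
--     while i < length:
--         ch = ord(string[i])
--         if ch >= 97 and ch <= 122:
--             new = new + chr(ch - 32)
--         else:
--             new = new + chr(ch)
--         i = i + 1
--
--     return new
-- ===== SOURCE B (Python) =====
-- _TABLE = {c: c - 32 for c in range(97, 123)}
--
-- def fun155(string):
--     return string.translate(_TABLE)
-- ===== Notes on version B (the rewrite author's own statement) =====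
-- stated objective: faster
-- what changed: Replaces the explicit ord/chr while-loop with quadratic string concatenation by a precomputed a-z translation table and a single str.translate call.
import Mathlib
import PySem

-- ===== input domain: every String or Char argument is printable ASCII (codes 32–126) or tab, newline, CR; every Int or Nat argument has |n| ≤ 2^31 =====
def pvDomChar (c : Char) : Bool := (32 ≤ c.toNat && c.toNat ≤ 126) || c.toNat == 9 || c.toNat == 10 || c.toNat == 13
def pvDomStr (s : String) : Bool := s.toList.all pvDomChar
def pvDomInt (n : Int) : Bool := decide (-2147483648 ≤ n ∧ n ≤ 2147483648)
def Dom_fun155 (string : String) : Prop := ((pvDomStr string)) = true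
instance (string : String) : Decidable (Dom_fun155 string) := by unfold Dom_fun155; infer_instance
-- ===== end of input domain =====

-- B replaces A's explicit ord/chr while-loop (with repeated string concatenation) by a
-- precomputed a→z translation table and a single str.translate pass (idiomatic rewrite).

-- ===== PORT A =====
-- A: while loop over indices building 'new' by concatenating one character per step;
-- ported as a left fold over the characters in order, appending one char each step.
def fun155 (string : String) : String :=
  String.mk (string.toList.foldl (fun new c =>
    let ch := c.toNat
    if 97 ≤ ch ∧ ch ≤ 122 then new ++ [Char.ofNat (ch - 32)] else new ++ [c]) [])

-- ===== PORT B =====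
-- B-side: the module-level table {c: c-32 for c in range(97, 123)}
def pvTable_fun155 : List (Int × Int) :=
  (PySem.List.pyRange 97 123 1).map (fun c => (c, c - 32))

-- str.translate(table): map each char through the table (dict lookup by codepoint),
-- unmapped codepoints pass through unchanged.
def fun155_alt (string : String) : String :=
  String.mk (string.toList.map (fun c =>
    match pvTable_fun155.lookup (c.toNat : Int) with
    | some v => Char.ofNat v.toNat
    | none => c))

-- ===== PRECONDITION & SPEC =====
def Spec_fun155 (string : String) (out : String) : Prop := out = fun155_alt string
instance (string : String) (out : String) : Decidable (Spec_fun155 string out) := by unfold Spec_fun155; infer_instance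

-- ===== CLAIM (what is proved, stated in full; the proofs are below) =====
def Claim_equal_fun155 : Prop := ∀ (string : String), Dom_fun155 string → Spec_fun155 string (fun155 string)

-- ===== LEMMAS AND PROOFS =====

theorem pvLookup_range (n : Int) : ∀ (k : Nat) (a : Int),
    ((PySem.List.pyRange a (a + k) 1).map (fun c => (c, c - 32))).lookup n =
      if a ≤ n ∧ n < a + k then some (n - 32) else none := by
  intro k
  induction k with
  | zero =>
    intro a
    rw [PySem.List.pyRange_one_eq_nil (by omega)]
    rw [if_neg (by omega)]
    rfl
  | succ m ih =>
    intro a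
    rw [PySem.List.pyRange_one_cons (by omega)]
    by_cases hna : n = a
    · subst hna
      simp
    · have hb : (n == a) = false := by simpa using hna
      simp only [List.map_cons, List.lookup, hb]
      have := ih (a + 1)
      rw [show (a + 1 + (m : Int)) = a + ((m : Nat) + 1 : Nat) by push_cast; ring] at this
      rw [this]
      by_cases hcond : a ≤ n ∧ n < a + ((m : Nat) + 1 : Nat)
      · rw [if_pos hcond, if_pos (by omega)]
      · rw [if_neg hcond, if_neg (by omega)]

theorem pvTable_lookup (n : Int) :
    pvTable_fun155.lookup n = if 97 ≤ n ∧ n ≤ 122 then some (n - 32) else none := by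
  rw [pvTable_fun155, show (123 : Int) = 97 + (26 : Nat) by norm_num, pvLookup_range n 26 97]
  by_cases hc : 97 ≤ n ∧ n ≤ 122
  · rw [if_pos (by push_cast; omega), if_pos hc]
  · rw [if_neg (by push_cast; omega), if_neg hc]

theorem pvFlatten_single (g : Char → Char) (l : List Char) :
    (l.map (fun c => [g c])).flatten = l.map g := by
  induction l with
  | nil => rfl
  | cons c t ih => simp [ih]

theorem pvChar_step (c : Char) :
    (if 97 ≤ c.toNat ∧ c.toNat ≤ 122 then [Char.ofNat (c.toNat - 32)] else [c]) =
    [match pvTable_fun155.lookup (c.toNat : Int) with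
     | some v => Char.ofNat v.toNat
     | none => c] := by
  rw [pvTable_lookup]
  by_cases h : 97 ≤ c.toNat ∧ c.toNat ≤ 122
  · rw [if_pos h, if_pos (by omega)]
    have : ((c.toNat : Int) - 32).toNat = c.toNat - 32 := by omega
    simp [this]
  · rw [if_neg h, if_neg (by omega)]

theorem pvFoldl_snoc (f : Char → List Char) (l : List Char) (acc : List Char) :
    l.foldl (fun new c => new ++ f c) acc = acc ++ l.flatMap f := by
  induction l generalizing acc with
  | nil => simp
  | cons c t ih => simp [List.foldl, ih, List.append_assoc]

-- ===== VERDICT (by name: the statement is the Claim_ definition above) =====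
theorem fun155_spec : Claim_equal_fun155 := by
  intro s _
  show fun155 s = fun155_alt s
  unfold fun155 fun155_alt
  congr 1
  have : ∀ new (c : Char),
      (let ch := c.toNat;
       if 97 ≤ ch ∧ ch ≤ 122 then new ++ [Char.ofNat (ch - 32)] else new ++ [c]) =
      new ++ (if 97 ≤ c.toNat ∧ c.toNat ≤ 122 then [Char.ofNat (c.toNat - 32)] else [c]) := by
    intro new c; by_cases h : 97 ≤ c.toNat ∧ c.toNat ≤ 122 <;> simp [h]
  simp only [this]
  rw [pvFoldl_snoc]
  simp only [pvChar_step]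
  rw [List.flatMap, pvFlatten_single, List.nil_append]
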